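-- pv_equiv track=rewrite | github.com/vtushar06/CodeForces | Codeforces Round 1026 (Div. 2)/A_Fashionable_Array.py | fashionable_array_odd
-- ===== SOURCE A (Python) =====
-- def fashionable_array_odd(a):
--     l, r = 0, len(a) - 1
--     count = 0
--
--     while l < r:
--         if (a[l] + a[r]) % 2 == 0:
--             return count
--         elif a[l] % 2 == 0:
--             l += 1
--             count += 1
--         elif a[r] % 2 == 0:
--             r -= 1
--             count += 1
--
--     return count
-- ===== SOURCE B (Python) =====
-- def fashionable_array_odd(a):
--     n = len(a)
--     if n < 2 or (a[0] + a[-1]) % 2 == 0: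
--         return 0
--     if a[0] % 2 == 0:
--         # endpoint sum is odd, so a[-1] is odd: only the left side can move;
--         # count consecutive even elements from the front
--         c = 0
--         while c < n - 1 and a[c] % 2 == 0:
--             c += 1
--         return c
--     else:
--         # a[0] is odd, a[-1] is even: count consecutive even elements from the back
--         c = 0
--         while c < n - 1 and a[n - 1 - c] % 2 == 0:
--             c += 1
--         return c
-- ===== Notes on version B (the rewrite author's own statement) =====
-- stated objective: simpler
-- what changed: Replaces the alternating two-pointer convergence loop (three-branch while over l,r) with an up-front parity decision on the endpoints followed by a single one-directional count of consecutive even elements.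
import Mathlib
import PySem

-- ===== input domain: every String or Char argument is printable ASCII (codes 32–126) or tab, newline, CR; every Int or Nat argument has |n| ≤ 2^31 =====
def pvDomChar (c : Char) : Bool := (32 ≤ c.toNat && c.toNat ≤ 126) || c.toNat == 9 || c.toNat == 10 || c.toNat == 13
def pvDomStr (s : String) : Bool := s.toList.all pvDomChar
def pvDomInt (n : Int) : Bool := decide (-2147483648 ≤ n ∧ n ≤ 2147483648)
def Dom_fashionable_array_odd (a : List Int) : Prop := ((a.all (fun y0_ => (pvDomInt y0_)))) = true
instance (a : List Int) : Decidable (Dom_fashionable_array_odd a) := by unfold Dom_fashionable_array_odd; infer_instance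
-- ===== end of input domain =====

-- ===== PORT A =====
-- A's alternating two-pointer loop, transliterated step for step.  The Nat fuel (initialised
-- to len(a), an upper bound on the iteration count) only makes the recursion structural; it is
-- never exhausted on a reachable state.  The final `else count` arm is unreachable from the
-- entry call (an odd endpoint sum forces exactly one endpoint even); Python would loop forever
-- there, but that state never occurs.
def pvLoopA (a : List Int) : Nat → Int → Int → Int → Int
  | 0, _, _, count => count
  | fuel + 1, l, r, count =>
    if l < r then
      let al := (PySem.List.pyGet? a l).getD 0   -- indices reached by the loop are in range
      let ar := (PySem.List.pyGet? a r).getD 0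
      if PySem.Int.mod (al + ar) 2 = 0 then count
      else if PySem.Int.mod al 2 = 0 then pvLoopA a fuel (l + 1) r (count + 1)
      else if PySem.Int.mod ar 2 = 0 then pvLoopA a fuel l (r - 1) (count + 1)
      else count
    else count

def fashionable_array_odd (a : List Int) : Int :=
  pvLoopA a a.length 0 ((a.length : Int) - 1) 0

-- ===== PORT B =====
-- B (simpler): parity decision on the endpoints, then one directional count of consecutive
-- even elements (forward scan / backward scan); fuel = len(a) bounds the while-loop count.
def pvScanF (a : List Int) : Nat → Nat → Int
  | 0, c => (c : Int)
  | fuel + 1, c =>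
    if c < a.length - 1 ∧ PySem.Int.mod ((PySem.List.pyGet? a (c : Int)).getD 0) 2 = 0 then
      pvScanF a fuel (c + 1)
    else (c : Int)

def pvScanB (a : List Int) : Nat → Nat → Int
  | 0, c => (c : Int)
  | fuel + 1, c =>
    if c < a.length - 1 ∧
        PySem.Int.mod ((PySem.List.pyGet? a ((a.length - 1 - c : Nat) : Int)).getD 0) 2 = 0 then
      pvScanB a fuel (c + 1)
    else (c : Int)

def fashionable_array_odd_alt (a : List Int) : Int :=
  if a.length < 2 then 0
  else
    let first := (PySem.List.pyGet? a 0).getD 0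
    let last := (PySem.List.pyGet? a (-1)).getD 0
    if PySem.Int.mod (first + last) 2 = 0 then 0
    else if PySem.Int.mod first 2 = 0 then pvScanF a a.length 0
    else pvScanB a a.length 0

-- ===== PRECONDITION & SPEC =====
def Spec_fashionable_array_odd (a : List Int) (out : Int) : Prop := out = fashionable_array_odd_alt a
instance (a : List Int) (out : Int) : Decidable (Spec_fashionable_array_odd a out) := by unfold Spec_fashionable_array_odd; infer_instance

-- ===== CLAIM (what is proved, stated in full; the proofs are below) =====
def Claim_equal_fashionable_array_odd : Prop := ∀ (a : List Int), Dom_fashionable_array_odd a → Spec_fashionable_array_odd a (fashionable_array_odd a)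

-- ===== LEMMAS AND PROOFS =====

theorem pvMod2 (x : Int) : PySem.Int.mod x 2 = x % 2 :=
  PySem.Int.mod_eq_emod_of_pos (by norm_num)

theorem pvGetNat (a : List Int) (i : Nat) :
    (PySem.List.pyGet? a (i : Int)).getD 0 = a.getD i 0 := by
  simp [PySem.List.pyGet?_natCast, List.getD]

theorem pvGetZero (a : List Int) : (PySem.List.pyGet? a 0).getD 0 = a.getD 0 0 := by
  simp [PySem.List.pyGet?_zero, List.getD]

theorem pvLast (a : List Int) :
    (PySem.List.pyGet? a (-1)).getD 0 = a.getD (a.length - 1) 0 := by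
  rw [PySem.List.pyGet?_neg_one, List.getLast?_eq_getElem?]
  simp [List.getD]

theorem pvScanF_step (a : List Int) (f c : Nat) (h1 : c < a.length - 1)
    (h2 : (a.getD c 0) % 2 = 0) : pvScanF a (f + 1) c = pvScanF a f (c + 1) := by
  simp only [pvScanF]
  rw [if_pos ⟨h1, by rw [pvGetNat, pvMod2]; exact h2⟩]

theorem pvScanF_stop (a : List Int) (f c : Nat)
    (h : a.length - 1 ≤ c ∨ (a.getD c 0) % 2 = 1) : pvScanF a f c = c := by
  cases f with
  | zero => rfl
  | succ f =>
    simp only [pvScanF]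
    rw [if_neg]
    rintro ⟨h1, h2⟩
    rw [pvGetNat, pvMod2] at h2
    rcases h with h | h <;> omega

theorem pvScanB_step (a : List Int) (f c : Nat) (h1 : c < a.length - 1)
    (h2 : (a.getD (a.length - 1 - c) 0) % 2 = 0) : pvScanB a (f + 1) c = pvScanB a f (c + 1) := by
  simp only [pvScanB]
  rw [if_pos ⟨h1, by rw [pvGetNat, pvMod2]; exact h2⟩]

theorem pvScanB_stop (a : List Int) (f c : Nat)
    (h : a.length - 1 ≤ c ∨ (a.getD (a.length - 1 - c) 0) % 2 = 1) : pvScanB a f c = c := by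
  cases f with
  | zero => rfl
  | succ f =>
    simp only [pvScanB]
    rw [if_neg]
    rintro ⟨h1, h2⟩
    rw [pvGetNat, pvMod2] at h2
    rcases h with h | h <;> omega

-- forward case: right endpoint odd, so only l ever moves
theorem pvFwd (a : List Int) (k : Nat) :
    ∀ (l : Nat) (count : Int) (fA fB : Nat), l + k = a.length - 1 → k < fA → k < fB →
      (a.getD (a.length - 1) 0) % 2 = 1 →
      pvLoopA a fA (l : Int) ((a.length : Int) - 1) count = count + pvScanF a fB l - l := by
  induction k with
  | zero =>
    intro l count fA fB hl hfA _ _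
    obtain ⟨f, rfl⟩ : ∃ f, fA = f + 1 := ⟨fA - 1, by omega⟩
    simp only [pvLoopA]
    rw [if_neg (by omega), pvScanF_stop a fB l (Or.inl (by omega))]
    ring
  | succ k ih =>
    intro l count fA fB hl hfA hfB hodd
    have hl1 : l < a.length - 1 := by omega
    obtain ⟨f, rfl⟩ : ∃ f, fA = f + 1 := ⟨fA - 1, by omega⟩
    obtain ⟨g, rfl⟩ : ∃ g, fB = g + 1 := ⟨fB - 1, by omega⟩
    simp only [pvLoopA]
    rw [if_pos (by omega),
      show ((a.length : Int) - 1) = ((a.length - 1 : Nat) : Int) from by omega]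
    simp only [pvGetNat, pvMod2]
    by_cases he : (a.getD l 0) % 2 = 0
    · rw [if_neg (by omega), if_pos he]
      have hrec := ih (l + 1) (count + 1) f g (by omega) (by omega) (by omega) hodd
      rw [show (l : Int) + 1 = ((l + 1 : Nat) : Int) from by omega,
        show ((a.length - 1 : Nat) : Int) = ((a.length : Int) - 1) from by omega,
        hrec, pvScanF_step a g l hl1 he]
      push_cast; ring
    · rw [if_pos (by omega), pvScanF_stop a (g + 1) l (Or.inr (by omega))]
      ring

-- backward case: left endpoint odd, so only r ever moves
theorem pvBwd (a : List Int) (k : Nat) :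
    ∀ (c : Nat) (count : Int) (fA fB : Nat), c + k = a.length - 1 → k < fA → k < fB →
      (a.getD 0 0) % 2 = 1 →
      pvLoopA a fA 0 ((a.length - 1 - c : Nat) : Int) count = count + pvScanB a fB c - c := by
  induction k with
  | zero =>
    intro c count fA fB hc hfA _ _
    obtain ⟨f, rfl⟩ : ∃ f, fA = f + 1 := ⟨fA - 1, by omega⟩
    simp only [pvLoopA]
    rw [if_neg (by omega), pvScanB_stop a fB c (Or.inl (by omega))]
    ring
  | succ k ih =>
    intro c count fA fB hc hfA hfB hodd
    have hc1 : c < a.length - 1 := by omega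
    obtain ⟨f, rfl⟩ : ∃ f, fA = f + 1 := ⟨fA - 1, by omega⟩
    obtain ⟨g, rfl⟩ : ∃ g, fB = g + 1 := ⟨fB - 1, by omega⟩
    simp only [pvLoopA]
    rw [if_pos (by omega)]
    simp only [pvGetNat, pvGetZero, pvMod2]
    by_cases he : (a.getD (a.length - 1 - c) 0) % 2 = 0
    · rw [if_neg (by omega), if_neg (by omega), if_pos he]
      have hrec := ih (c + 1) (count + 1) f g (by omega) (by omega) (by omega) hodd
      rw [show ((a.length - 1 - c : Nat) : Int) - 1 = ((a.length - 1 - (c + 1) : Nat) : Int)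
            from by omega,
        hrec, pvScanB_step a g c hc1 he]
      push_cast; ring
    · rw [if_pos (by omega), pvScanB_stop a (g + 1) c (Or.inr (by omega))]
      ring

-- ===== VERDICT (by name: the statement is the Claim_ definition above) =====
theorem fashionable_array_odd_spec : Claim_equal_fashionable_array_odd := by
  intro a _
  unfold Spec_fashionable_array_odd fashionable_array_odd fashionable_array_odd_alt
  by_cases hn : a.length < 2
  · rw [if_pos hn]
    have h01 : a.length = 0 ∨ a.length = 1 := by omega
    rcases h01 with h | h <;> simp [pvLoopA, h]
  · rw [if_neg hn]
    simp only [pvLast, pvGetZero, pvMod2]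
    by_cases hsum : (a.getD 0 0 + a.getD (a.length - 1) 0) % 2 = 0
    · rw [if_pos hsum]
      obtain ⟨f, hf⟩ : ∃ f, a.length = f + 1 := ⟨a.length - 1, by omega⟩
      rw [hf]
      simp only [pvLoopA]
      rw [if_pos (by omega),
        show (((f + 1 : Nat) : Int) - 1) = ((a.length - 1 : Nat) : Int) from by omega]
      simp only [pvGetNat, pvGetZero, pvMod2]
      rw [if_pos hsum]
    · rw [if_neg hsum]
      by_cases hfe : (a.getD 0 0) % 2 = 0
      · rw [if_pos hfe]
        have := pvFwd a (a.length - 1) 0 0 a.length a.length (by omega) (by omega) (by omega)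
          (by omega)
        simpa using this
      · rw [if_neg hfe]
        rw [show ((a.length : Int) - 1) = ((a.length - 1 - 0 : Nat) : Int) from by omega]
        have := pvBwd a (a.length - 1) 0 0 a.length a.length (by omega) (by omega) (by omega)
          (by omega)
        simpa using this
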